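-- pv_equiv track=rewrite | github.com/suyeonsu/algorithm | programmers/신고결과받기.py | solution
-- ===== SOURCE A (Python) =====
-- def solution(id_list, report, k):
--     report_list = {user:set() for user in id_list}
--     for r in set(report): report_list[r.split()[0]].add(r.split()[1])
--
--     reported = {user:0 for user in id_list}
--     for r in set(report): reported[r.split()[1]] += 1
--
--     black_list = set([user for user, cnt in reported.items() if cnt >= k])
--
--     answer = [len(repo & black_list) for repo in report_list.values()]
--     return answer
-- ===== SOURCE B (Python) =====
-- def solution(id_list, report, k):
--     distinct = set(report)
--     cnt = {}
--     for r in distinct: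
--         whom = r.split()[1]
--         cnt[whom] = cnt.get(whom, 0) + 1
--     answer = {user: 0 for user in id_list}
--     for r in distinct:
--         if cnt[r.split()[1]] >= k:
--             answer[r.split()[0]] += 1
--     return list(answer.values())
-- ===== Notes on version B (the rewrite author's own statement) =====
-- stated objective: simpler
-- what changed: A builds a reporter-to-reported-set dict, a per-victim counter dict and a blacklist set, then maps a set-intersection size over the dict's values; B builds only the victim counter and makes one direct counting pass over the distinct reports, incrementing the reporter's answer whenever the victim's count reaches k.
-- outside the precondition, e.g. on solution(['a', 'b'], ['a b', 'a  b'], 2): A returns [1, 0], B returns [2, 0]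
import Mathlib
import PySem

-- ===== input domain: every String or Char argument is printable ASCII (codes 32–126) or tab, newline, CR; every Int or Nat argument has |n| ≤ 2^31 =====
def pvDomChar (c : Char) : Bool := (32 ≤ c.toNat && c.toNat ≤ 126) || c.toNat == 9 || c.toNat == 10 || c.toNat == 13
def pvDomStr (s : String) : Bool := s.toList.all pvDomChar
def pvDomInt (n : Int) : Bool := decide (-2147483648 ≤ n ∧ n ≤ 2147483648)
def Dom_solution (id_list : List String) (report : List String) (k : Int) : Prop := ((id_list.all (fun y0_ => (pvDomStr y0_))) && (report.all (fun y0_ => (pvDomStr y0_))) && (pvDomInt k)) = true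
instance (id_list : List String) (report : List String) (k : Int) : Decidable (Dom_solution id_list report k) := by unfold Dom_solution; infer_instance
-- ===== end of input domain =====

-- B replaces A's reporter→reported-set dict, per-victim counter and set-intersection pass by a single victim
-- counter plus one direct counting pass that increments each reporter's answer (objective: simpler).

-- shared tokenisation helper: r.split()[0] / r.split()[1]; under Pre_ the split has ≥ 2 pieces,
-- so List.getD with these nonnegative literal indices is exactly Python's indexing.
def pvTok0 (r : String) : String := (PySem.Str.split₀ r).getD 0 ""
def pvTok1 (r : String) : String := (PySem.Str.split₀ r).getD 1 ""

-- ===== PORT A =====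
def solution (id_list : List String) (report : List String) (k : Int) : List Int :=
  let D : PySem.Set String := PySem.Set.ofList report
  let report_list : PySem.Dict String (PySem.Set String) :=
    D.foldl (fun d r => d.modify (pvTok0 r) PySem.Set.empty (fun s => PySem.Set.add s (pvTok1 r)))
      (id_list.foldl (fun d u => d.insert u PySem.Set.empty) PySem.Dict.empty)
  let reported : PySem.Dict String Int :=
    D.foldl (fun d r => d.modify (pvTok1 r) 0 (· + 1))
      (id_list.foldl (fun d u => d.insert u (0 : Int)) PySem.Dict.empty)
  let black_list : PySem.Set String :=
    PySem.Set.ofList ((reported.items.filter (fun p => decide (k ≤ p.2))).map Prod.fst)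
  report_list.values.map (fun repo => PySem.Set.len (PySem.Set.inter repo black_list))

-- ===== PORT B =====
def solution_alt (id_list : List String) (report : List String) (k : Int) : List Int :=
  let distinct : PySem.Set String := PySem.Set.ofList report
  let cnt : PySem.Dict String Int :=
    distinct.foldl (fun d r => d.insert (pvTok1 r) (d.getD (pvTok1 r) 0 + 1)) PySem.Dict.empty
  let answer : PySem.Dict String Int :=
    distinct.foldl
      (fun d r => if k ≤ cnt.getD (pvTok1 r) 0 then d.modify (pvTok0 r) 0 (· + 1) else d)
      (id_list.foldl (fun d u => d.insert u (0 : Int)) PySem.Dict.empty)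
  answer.values

-- ===== PRECONDITION & SPEC =====
-- Pre_ excludes (a) inputs where A raises (a report string with fewer than two whitespace-separated
-- tokens, or a reporter or reported user missing from id_list: IndexError/KeyError), and (b) one
-- defensible corner on which A still returns: two distinct report strings that parse to the same
-- (reporter, reported) pair (extra whitespace or trailing tokens), where counting them as one report
-- or as two is unspecified and A itself dedups before parsing on one side of its computation and
-- after parsing on the other.
def Pre_solution (id_list : List String) (report : List String) (k : Int) : Prop :=
  (∀ r ∈ report, 2 ≤ (PySem.Str.split₀ r).length ∧ pvTok0 r ∈ id_list ∧ pvTok1 r ∈ id_list) ∧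
  (∀ r ∈ report, ∀ s ∈ report, pvTok0 r = pvTok0 s → pvTok1 r = pvTok1 s → r = s)
instance (id_list : List String) (report : List String) (k : Int) : Decidable (Pre_solution id_list report k) := by unfold Pre_solution; infer_instance

def pvWitness_solution : List String × List String × Int :=
  (["muzi", "frodo", "apeach"], ["muzi frodo", "apeach frodo"], 2)

def Spec_solution (id_list : List String) (report : List String) (k : Int) (out : List Int) : Prop := out = solution_alt id_list report k
instance (id_list : List String) (report : List String) (k : Int) (out : List Int) : Decidable (Spec_solution id_list report k out) := by unfold Spec_solution; infer_instance

-- ===== CLAIM (what is proved, stated in full; the proofs are below) =====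
def Claim_equal_solution : Prop := ∀ (id_list : List String) (report : List String) (k : Int), Dom_solution id_list report k → Pre_solution id_list report k → Spec_solution id_list report k (solution id_list report k)

-- ===== LEMMAS AND PROOFS =====

-- lookup in a dict built by inserting the constant v0 at every key of l
lemma pv_getD_init {ν : Type} (l : List String) (v0 dflt : ν) (d : PySem.Dict String ν) (u : String) :
    (l.foldl (fun d x => d.insert x v0) d).getD u dflt
      = if u ∈ l then v0 else d.getD u dflt := by
  induction l generalizing d with
  | nil => simp
  | cons a t ih =>
      simp only [List.foldl_cons, ih, PySem.Dict.getD_insert, List.mem_cons]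
      by_cases h : u ∈ t <;> by_cases h' : u = a <;> simp [h, h']

-- lookup after a fold of modifies keyed through `key`: only the hits at u matter
lemma pv_getD_foldl_modify_gen {α ν : Type} (l : List α) (key : α → String) (d0v : ν)
    (f : α → ν → ν) (d : PySem.Dict String ν) (u : String) :
    (l.foldl (fun d r => d.modify (key r) d0v (f r)) d).getD u d0v
      = (l.filter (fun r => key r == u)).foldl (fun v r => f r v) (d.getD u d0v) := by
  induction l generalizing d with
  | nil => simp
  | cons a t ih =>
      simp only [List.foldl_cons, ih, List.filter_cons]
      by_cases h : key a = u
      · simp [h]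
      · simp [h, PySem.Dict.getD_modify, Ne.symm h]

-- updating a set with elements it already has changes nothing
lemma pv_set_update_of_subset (s : PySem.Set String) (xs : List String)
    (h : ∀ x ∈ xs, x ∈ s) : PySem.Set.update s xs = s := by
  induction xs with
  | nil => rfl
  | cons a t ih =>
      have ha : PySem.Set.add s a = s := by
        simp [PySem.Set.add, PySem.Set.contains, h a (by simp)]
      simpa [PySem.Set.update, List.foldl_cons, ha] using
        ih (fun x hx => h x (by simp [hx]))

theorem solution_spec : Claim_equal_solution := by
  intro id_list report k _ hpre
  obtain ⟨hmem, hinj⟩ := hpre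
  show solution id_list report k = solution_alt id_list report k
  simp only [solution, solution_alt]
  set D : List String := PySem.Set.ofList report with hD
  have hDsub : ∀ r ∈ D, r ∈ report := fun r hr => (PySem.Set.mem_ofList report r).mp hr
  have hDnd : D.Nodup := PySem.Set.nodup_ofList report
  -- I is the deduplicated id list: both dicts carry exactly these keys, in this order
  set I : List String := PySem.Set.ofList id_list with hI
  have hInd : I.Nodup := PySem.Set.nodup_ofList id_list
  have hImem : ∀ x, x ∈ I ↔ x ∈ id_list := fun x => PySem.Set.mem_ofList id_list x
  -- the canonical count of (deduplicated) reports against w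
  set c : String → Int := fun w => ((D.filter (fun r => pvTok1 r == w)).length : Int) with hc
  -- init dicts
  set d0S : PySem.Dict String (PySem.Set String) :=
    id_list.foldl (fun d u => d.insert u PySem.Set.empty) PySem.Dict.empty with hd0S
  set d0Z : PySem.Dict String Int :=
    id_list.foldl (fun d u => d.insert u (0 : Int)) PySem.Dict.empty with hd0Z
  have hinitS : ∀ u, d0S.getD u PySem.Set.empty = PySem.Set.empty := by
    intro u; rw [hd0S, pv_getD_init]; split <;> simp
  have hinitZ : ∀ u, d0Z.getD u 0 = 0 := by
    intro u; rw [hd0Z, pv_getD_init]; split <;> simp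
  have hkeys0 : ∀ {ν : Type} (v0 : ν),
      (id_list.foldl (fun d u => d.insert u v0) PySem.Dict.empty).keys = I := by
    intro ν v0
    rw [PySem.Dict.keys_foldl_insert id_list (fun _ _ => v0) PySem.Dict.empty]
    rfl
  -- A's reporter → reported-set dict
  set RL : PySem.Dict String (PySem.Set String) :=
    D.foldl (fun d r => d.modify (pvTok0 r) PySem.Set.empty (fun s => PySem.Set.add s (pvTok1 r))) d0S with hRL
  have hkRL : RL.keys = I := by
    rw [hRL, PySem.Dict.keys_foldl_modify_key D pvTok0 PySem.Set.empty
      (fun _ r s => PySem.Set.add s (pvTok1 r)) d0S, hd0S, hkeys0]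
    exact pv_set_update_of_subset _ _ (by
      intro x hx
      obtain ⟨r, hr, rfl⟩ := List.mem_map.mp hx
      exact (hImem _).mpr (hmem r (hDsub r hr)).2.1)
  have hrepo : ∀ u, RL.getD u PySem.Set.empty
      = PySem.Set.ofList ((D.filter (fun r => pvTok0 r == u)).map pvTok1) := by
    intro u
    rw [hRL, pv_getD_foldl_modify_gen D pvTok0 PySem.Set.empty
      (fun r s => PySem.Set.add s (pvTok1 r)) d0S u, hinitS u]
    show _ = (((D.filter (fun r => pvTok0 r == u)).map pvTok1).foldl PySem.Set.add PySem.Set.empty)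
    rw [List.foldl_map]
  -- A's per-victim counter
  set RP : PySem.Dict String Int :=
    D.foldl (fun d r => d.modify (pvTok1 r) 0 (· + 1)) d0Z with hRP
  have hrep : ∀ w, RP.getD w 0 = c w := by
    intro w
    rw [hRP, pv_getD_foldl_modify_gen D pvTok1 0 (fun _ v => v + 1) d0Z w, hinitZ w,
      PySem.List.foldl_add _ (fun _ => 1)]
    simp [hc, mul_comm]
  have hkRP : RP.keys = I := by
    rw [hRP, PySem.Dict.keys_foldl_modify_key D pvTok1 0 (fun _ _ v => v + 1) d0Z, hd0Z, hkeys0]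
    exact pv_set_update_of_subset _ _ (by
      intro x hx
      obtain ⟨r, hr, rfl⟩ := List.mem_map.mp hx
      exact (hImem _).mpr (hmem r (hDsub r hr)).2.2)
  -- A's blacklist
  set BL : PySem.Set String :=
    PySem.Set.ofList ((RP.items.filter (fun p => decide (k ≤ p.2))).map Prod.fst) with hBL
  have hblack : BL = I.filter (fun u => decide (k ≤ c u)) := by
    rw [hBL, PySem.Dict.items_eq_map_keys RP (hkRP ▸ hInd) 0, hkRP, List.filter_map,
      List.map_map]
    have h1 : ((fun p : String × Int => decide (k ≤ p.2)) ∘ fun u => (u, RP.getD u 0))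
        = fun u => decide (k ≤ c u) := by
      funext u; simp [Function.comp, hrep u]
    have h2 : (Prod.fst ∘ fun u : String => (u, RP.getD u 0)) = id := by
      funext u; rfl
    rw [h1, h2, List.map_id]
    exact PySem.Set.ofList_eq_self_of_nodup _ (hInd.filter _)
  have hblackmem : ∀ w ∈ id_list, BL.contains w = decide (k ≤ c w) := by
    intro w hw
    rw [hblack]
    by_cases h : k ≤ c w <;>
      simp [PySem.Set.contains, List.mem_filter, (hImem w).mpr hw, h]
  -- the common per-user value
  set N : String → Int :=
    fun u => ((D.countP (fun r => pvTok0 r == u && decide (k ≤ c (pvTok1 r)))) : Int) with hN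
  -- A's entry
  have hA : ∀ u,
      PySem.Set.len (PySem.Set.inter (RL.getD u PySem.Set.empty) BL) = N u := by
    intro u
    rw [hrepo u]
    have hLnd : (D.filter (fun r => pvTok0 r == u)).Nodup := hDnd.filter _
    have hmapnd : ((D.filter (fun r => pvTok0 r == u)).map pvTok1).Nodup := by
      refine (List.nodup_map_iff_inj_on hLnd).mpr ?_
      intro x hx y hy hxy
      have hx' := List.mem_filter.mp hx
      have hy' := List.mem_filter.mp hy
      exact hinj x (hDsub x hx'.1) y (hDsub y hy'.1)
        ((eq_of_beq hx'.2).trans (eq_of_beq hy'.2).symm) hxy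
    rw [PySem.Set.ofList_eq_self_of_nodup _ hmapnd]
    show (((((D.filter (fun r => pvTok0 r == u)).map pvTok1).filter
      (fun x => BL.contains x)).length : Int)) = N u
    rw [List.filter_map, List.length_map, ← List.countP_eq_length_filter,
      List.countP_filter, hN]
    congr 1
    refine List.countP_congr ?_
    intro r hr
    simp only [Function.comp]
    rw [hblackmem (pvTok1 r) (hmem r (hDsub r hr)).2.2, Bool.and_comm]
  -- B's counter agrees with A's
  set CB : PySem.Dict String Int :=
    D.foldl (fun d r => d.insert (pvTok1 r) (d.getD (pvTok1 r) 0 + 1)) PySem.Dict.empty with hCB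
  have hcnt : ∀ w, CB.getD w 0 = c w := by
    intro w
    rw [hCB, ← List.foldl_map (f := pvTok1)
      (g := fun (d : PySem.Dict String Int) x => d.insert x (d.getD x 0 + 1)),
      PySem.Dict.getD_foldl_insert_add_one]
    rw [List.count_eq_countP, List.countP_map, List.countP_eq_length_filter]
    simp [hc]
    rfl
  -- B's answer dict, rewritten as a plain modify-fold over the passing reports
  have hans : (D.foldl (fun d r =>
        if k ≤ CB.getD (pvTok1 r) 0 then d.modify (pvTok0 r) 0 (· + 1) else d) d0Z)
      = (D.filter (fun r => decide (k ≤ CB.getD (pvTok1 r) 0))).foldl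
          (fun d r => d.modify (pvTok0 r) 0 (· + 1)) d0Z :=
    PySem.List.foldl_ite_eq_foldl_filter (fun r => k ≤ CB.getD (pvTok1 r) 0)
      (fun d r => d.modify (pvTok0 r) 0 (· + 1)) D d0Z
  set F : List String := D.filter (fun r => decide (k ≤ CB.getD (pvTok1 r) 0)) with hF
  set AN : PySem.Dict String Int := F.foldl (fun d r => d.modify (pvTok0 r) 0 (· + 1)) d0Z with hAN
  have hkAN : AN.keys = I := by
    rw [hAN, PySem.Dict.keys_foldl_modify_key F pvTok0 0 (fun _ _ v => v + 1) d0Z, hd0Z, hkeys0]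
    exact pv_set_update_of_subset _ _ (by
      intro x hx
      obtain ⟨r, hr, rfl⟩ := List.mem_map.mp hx
      exact (hImem _).mpr (hmem r (hDsub r (List.mem_filter.mp hr).1)).2.1)
  -- B's entry
  have hB : ∀ u, AN.getD u 0 = N u := by
    intro u
    rw [hAN, pv_getD_foldl_modify_gen F pvTok0 0 (fun _ v => v + 1) d0Z u, hinitZ u,
      PySem.List.foldl_add _ (fun _ => 1)]
    simp only [List.map_const', List.sum_replicate, nsmul_eq_mul, mul_one, zero_add, hN]
    norm_cast
    rw [hF, ← List.countP_eq_length_filter, List.countP_filter]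
    refine List.countP_congr ?_
    intro r _
    simp only [hcnt]
  -- assemble: both sides are maps over the deduplicated id list I
  have hvalsA : RL.values = I.map (fun u => RL.getD u PySem.Set.empty) := by
    rw [PySem.Dict.values_eq_map_keys RL (hkRL ▸ hInd) PySem.Set.empty, hkRL]
  have hvalsB : AN.values = I.map (fun u => AN.getD u 0) := by
    rw [PySem.Dict.values_eq_map_keys AN (hkAN ▸ hInd) 0, hkAN]
  rw [hans, hvalsA, hvalsB, List.map_map]
  refine List.map_congr_left ?_
  intro u _
  simp only [Function.comp]
  rw [hA u, hB u]
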